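-- pv_equiv track=rewrite | github.com/B0nneySeth002/B0nneySeth002 | scrabbleGame.py | playable
-- ===== SOURCE A (Python) =====
-- def playable(word, hand):
--     '''Given a word and a hand, where a word is a string of letters
--        and a hand is a list of tiles (which are themselves letters),
--        returns True if that word can be played using only the tiles in
--        hand and False if not.  For example:
--           playable("ADZE", ['Z', 'C', 'E', 'E', 'D', 'T', 'A'])     --> True
--           playable("ARIOSE", ['R', 'I', 'S', 'A', 'O', 'I', 'E'])   --> True
--           playable("UCALEGON", ['R', 'I', 'S', 'A', 'O', 'I', 'E']) --> False
--           playable("AREA", ['A', 'E', 'I', 'O', 'U', 'Y', 'R'])     --> False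
--        Notice this last example returns False because, although there is an 'A'
--        in the hand, the word "AREA" requires *two* 'A's.'''
--
--
--     '''Here a copy of the hand is made just to maintain the original
--     set whenever a new word is to be printed'''
--     _hand = hand.copy()
--
--     for item in word:
--         try:
--             _hand.remove(item)
--         except ValueError:
--             return False
--     return True
-- ===== SOURCE B (Python) =====
-- def playable(word, hand):
--     sorted_word = sorted(word)
--     sorted_hand = sorted(hand)
--     j = 0
--     n = len(sorted_hand)
--     for ch in sorted_word:
--         while j < n and sorted_hand[j] < ch:
--             j += 1
--         if j == n or sorted_hand[j] != ch:
--             return False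
--         j += 1
--     return True
-- ===== Notes on version B (the rewrite author's own statement) =====
-- stated objective: faster
-- what changed: B sorts the word's letters and the hand once and checks playability with a single two-pointer merge over the two sorted lists, instead of A's repeated list.remove scans over a mutating copy of the hand.
import Mathlib
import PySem

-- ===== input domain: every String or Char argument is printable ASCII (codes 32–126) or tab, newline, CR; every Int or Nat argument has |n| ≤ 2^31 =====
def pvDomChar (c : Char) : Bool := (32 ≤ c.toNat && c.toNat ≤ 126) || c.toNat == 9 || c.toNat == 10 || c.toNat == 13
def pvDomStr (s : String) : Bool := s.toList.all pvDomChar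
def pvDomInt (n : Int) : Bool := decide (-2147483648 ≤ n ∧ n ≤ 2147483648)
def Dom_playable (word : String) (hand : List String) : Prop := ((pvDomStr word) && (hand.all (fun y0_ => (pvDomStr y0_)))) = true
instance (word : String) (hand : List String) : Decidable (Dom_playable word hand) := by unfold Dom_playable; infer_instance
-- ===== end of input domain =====

-- B sorts word letters and hand once and does a single two-pointer merge instead of A's repeated list.remove scans (objective: alternative algorithm).

-- ===== PORT A =====
-- loop 'for item in word: try _hand.remove(item) except ValueError: return False'
def playableGo (hand : List String) : List Char → Bool
  | [] => true
  | c :: rest =>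
    match PySem.List.remove? hand (String.ofList [c]) with
    | none => false
    | some h => playableGo h rest

def playable (word : String) (hand : List String) : Bool :=
  playableGo hand word.toList   -- '_hand = hand.copy()' is the identity on the functional list

-- ===== PORT B =====
-- the for-loop over sorted_word with pointer j into sorted_hand: 'skip' is the inner
-- while (sorted_hand[j] < ch), 'consume' is i+=1 / j+=1, mismatch returns False
def mergeGo : List String → List String → Bool
  | [], _ => true
  | _ :: _, [] => false
  | a :: as, b :: bs =>
    if b < a then mergeGo (a :: as) bs
    else if b = a then mergeGo as bs
    else false
termination_by _ h => h.length

def playable_alt (word : String) (hand : List String) : Bool :=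
  mergeGo (PySem.List.sorted (word.toList.map (fun c => String.ofList [c])) (fun x => x) false)
          (PySem.List.sorted hand (fun x => x) false)

-- ===== PRECONDITION & SPEC =====
def Spec_playable (word : String) (hand : List String) (out : Bool) : Prop := out = playable_alt word hand
instance (word : String) (hand : List String) (out : Bool) : Decidable (Spec_playable word hand out) := by unfold Spec_playable; infer_instance

-- ===== CLAIM (what is proved, stated in full; the proofs are below) =====
def Claim_equal_playable : Prop := ∀ (word : String) (hand : List String), Dom_playable word hand → Spec_playable word hand (playable word hand)

-- ===== LEMMAS AND PROOFS =====

-- A's removal loop decides the sub-multiset relation.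
theorem playableGo_eq_decide (cs : List Char) :
    ∀ hand : List String,
      playableGo hand cs
        = decide ((↑(cs.map (fun c => String.ofList [c])) : Multiset String) ≤ ↑hand) := by
  induction cs with
  | nil => intro hand; simp [playableGo]
  | cons c rest ih =>
    intro hand
    simp only [playableGo, List.map]
    by_cases hmem : (String.ofList [c]) ∈ hand
    · rw [PySem.List.remove?_eq_some_erase hand _ hmem]
      show playableGo (hand.erase (String.ofList [c])) rest = _
      rw [ih]
      have : ((↑(String.ofList [c] :: rest.map (fun c => String.ofList [c])) : Multiset String) ≤ ↑hand)
          ↔ ((↑(rest.map (fun c => String.ofList [c])) : Multiset String) ≤ ↑(hand.erase (String.ofList [c]))) := by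
        rw [← Multiset.coe_erase]
        constructor
        · intro h
          rw [← Multiset.cons_erase (show (String.ofList [c]) ∈ (↑hand : Multiset String) by simpa using hmem)] at h
          exact (Multiset.cons_le_cons_iff _).1 h
        · intro h
          calc (↑(String.ofList [c] :: rest.map (fun c => String.ofList [c])) : Multiset String)
              = (String.ofList [c]) ::ₘ ↑(rest.map (fun c => String.ofList [c])) := rfl
            _ ≤ (String.ofList [c]) ::ₘ (↑hand : Multiset String).erase (String.ofList [c]) :=
                (Multiset.cons_le_cons_iff _).2 h
            _ = ↑hand := Multiset.cons_erase (by simpa using hmem)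
      simp [this]
    · rw [(PySem.List.remove?_eq_none_iff _ _).mpr hmem]
      have : ¬ ((↑(String.ofList [c] :: rest.map (fun c => String.ofList [c])) : Multiset String) ≤ ↑hand) := by
        intro h
        have := Multiset.mem_of_le h (by simp : (String.ofList [c]) ∈ (↑(String.ofList [c] :: rest.map (fun c => String.ofList [c])) : Multiset String))
        simp at this
        exact hmem this
      simp [this]

-- On sorted lists, the two-pointer merge decides the sub-multiset relation.
theorem mergeGo_eq_decide :
    ∀ (h w : List String), w.Pairwise (· ≤ ·) → h.Pairwise (· ≤ ·) →
      mergeGo w h = decide ((↑w : Multiset String) ≤ ↑h) := by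
  intro h
  induction h with
  | nil =>
    intro w hw _
    cases w with
    | nil => simp [mergeGo]
    | cons a as =>
      have : ¬ ((↑(a :: as) : Multiset String) ≤ (0 : Multiset String)) := by
        simp
      simp [mergeGo, this]
  | cons b bs ih =>
    intro w hw hh
    cases w with
    | nil => simp [mergeGo]
    | cons a as =>
      have hhb : ∀ x ∈ bs, b ≤ x := fun x hx => (List.pairwise_cons.1 hh).1 x hx
      have hhs : bs.Pairwise (· ≤ ·) := (List.pairwise_cons.1 hh).2
      have hwa : ∀ x ∈ as, a ≤ x := fun x hx => (List.pairwise_cons.1 hw).1 x hx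
      have hws : as.Pairwise (· ≤ ·) := (List.pairwise_cons.1 hw).2
      by_cases hba : b < a
      · -- skip b: b cannot occur in a :: as
        rw [show mergeGo (a :: as) (b :: bs) = mergeGo (a :: as) bs by
              simp [mergeGo, hba]]
        rw [ih (a :: as) hw hhs]
        have hiff : ((↑(a :: as) : Multiset String) ≤ ↑(b :: bs)) ↔ ((↑(a :: as) : Multiset String) ≤ ↑bs) := by
          constructor
          · intro hle
            rw [Multiset.le_iff_count] at hle ⊢
            intro x
            have hx := hle x
            rcases eq_or_ne x b with rfl | hxb
            · have hcount0 : (↑(a :: as) : Multiset String).count x = 0 := by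
                rw [Multiset.count_eq_zero]
                intro hxm
                simp at hxm
                rcases hxm with rfl | hxm
                · exact absurd hba (lt_irrefl _)
                · exact absurd (lt_of_lt_of_le hba (hwa _ hxm)) (lt_irrefl _)
              rw [hcount0]
              exact Nat.zero_le _
            · have hcb : (↑(b :: bs) : Multiset String).count x = (↑bs : Multiset String).count x := by
                rw [show (↑(b :: bs) : Multiset String) = b ::ₘ ↑bs from rfl,
                    Multiset.count_cons_of_ne hxb]
              rw [← hcb]
              exact hx
          · intro hle
            exact le_trans hle (by
              show (↑bs : Multiset String) ≤ ↑(b :: bs)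
              exact Multiset.le_cons_self _ _)
        simp [hiff]
      · by_cases hab : b = a
        · subst hab
          rw [show mergeGo (b :: as) (b :: bs) = mergeGo as bs by
                simp [mergeGo]]
          rw [ih as hws hhs]
          have : ((↑(b :: as) : Multiset String) ≤ ↑(b :: bs)) ↔ ((↑as : Multiset String) ≤ ↑bs) :=
            Multiset.cons_le_cons_iff (s := (↑as : Multiset String)) (t := (↑bs : Multiset String)) b
          simp [this]
        · -- a < b: a cannot occur in b :: bs
          have hab' : a < b := lt_of_le_of_ne (not_lt.mp hba) (Ne.symm hab)
          rw [show mergeGo (a :: as) (b :: bs) = false by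
                simp [mergeGo, hba, hab]]
          have : ¬ ((↑(a :: as) : Multiset String) ≤ ↑(b :: bs)) := by
            intro hle
            have hmem := Multiset.mem_of_le hle (by simp : a ∈ (↑(a :: as) : Multiset String))
            simp at hmem
            rcases hmem with rfl | hmem
            · exact absurd hab' (lt_irrefl _)
            · exact absurd (lt_of_lt_of_le hab' (hhb _ hmem)) (lt_irrefl _)
          simp [this]

-- ===== VERDICT (by name: the statement is the Claim_ definition above) =====
theorem playable_spec : Claim_equal_playable := by
  intro word hand _
  unfold Spec_playable playable playable_alt
  rw [playableGo_eq_decide, mergeGo_eq_decide _ _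
        (by simpa using PySem.List.sorted_pairwise (word.toList.map (fun c => String.ofList [c])) (fun x => x))
        (by simpa using PySem.List.sorted_pairwise hand (fun x => x))]
  congr 1
  rw [Multiset.coe_eq_coe.2 (PySem.List.sorted_perm _ _ _),
      Multiset.coe_eq_coe.2 (PySem.List.sorted_perm _ _ _)]
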